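-- pv_equiv track=rewrite | github.com/pypi-data/pypi-mirror-356 | packages/multipoint-model-runner/multipoint_model_runner-0.12.19-py3-none-any.whl/multipoint_model_runner/main.py | getvocabidxs
-- ===== SOURCE A (Python) =====
-- def getvocabidxs(max_chars, text, char2vocabidx):
--     text = "" if text is None else text
--     return [
--         (
--             char2vocabidx[uppercase_char]
--             if i < len(text) and (uppercase_char := text[i].upper()) in char2vocabidx
--             else char2vocabidx["|"]
--         )
--         for i in range(max_chars)
--     ]
-- ===== SOURCE B (Python) =====
-- def getvocabidxs(max_chars, text, char2vocabidx):
--     s = "" if text is None else text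
--     n = max(max_chars, 0)
--     mapped = [
--         char2vocabidx[u] if (u := c.upper()) in char2vocabidx else char2vocabidx["|"]
--         for c in s[:n]
--     ]
--     k = n - len(mapped)
--     if k > 0:
--         mapped = mapped + [char2vocabidx["|"]] * k
--     return mapped
-- ===== Notes on version B (the rewrite author's own statement) =====
-- stated objective: alternative
-- what changed: B replaces A's single indexed loop over range(max_chars) (with an i < len(text) bound test inside every iteration) by two shaped passes: a direct map over the characters of the clamped slice text[:max(max_chars,0)] followed by appending a computed block of padding indices.
import Mathlib
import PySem

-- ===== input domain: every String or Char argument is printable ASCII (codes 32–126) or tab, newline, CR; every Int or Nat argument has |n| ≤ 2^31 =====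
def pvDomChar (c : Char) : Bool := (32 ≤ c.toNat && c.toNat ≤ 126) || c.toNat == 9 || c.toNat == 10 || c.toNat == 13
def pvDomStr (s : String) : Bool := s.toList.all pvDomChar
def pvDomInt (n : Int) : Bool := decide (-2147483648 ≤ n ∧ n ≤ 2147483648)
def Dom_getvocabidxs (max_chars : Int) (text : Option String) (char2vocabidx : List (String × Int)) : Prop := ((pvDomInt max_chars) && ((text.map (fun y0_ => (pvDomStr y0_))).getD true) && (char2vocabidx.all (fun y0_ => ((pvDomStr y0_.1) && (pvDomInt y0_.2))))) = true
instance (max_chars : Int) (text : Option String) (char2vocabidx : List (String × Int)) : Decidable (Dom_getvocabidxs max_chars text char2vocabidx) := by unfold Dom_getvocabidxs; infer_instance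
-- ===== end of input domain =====

-- B maps over the clamped slice text[:max(max_chars,0)] and then appends the padding block,
-- instead of A's indexed loop over range(max_chars); same cost, different decomposition.
-- Dict lookup (first match in the association list); Python's d[k] raises KeyError when absent:
-- the port returns the first binding, `none` when absent.
def pvLookup? (d : List (String × Int)) (k : String) : Option Int :=
  match d with
  | [] => none
  | (k', v) :: rest => if k' = k then some v else pvLookup? rest k

-- ===== PORT A =====
def getvocabidxs (max_chars : Int) (text : Option String) (char2vocabidx : List (String × Int)) : List Int :=
  let t := (text.getD "").toList
  (PySem.List.pyRange 0 max_chars 1).map (fun i =>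
    -- text[i].upper(): the character is in range when the guard i < len(text) holds
    let uc : String := String.ofList [PySem.Chars.upperChar (PySem.List.pyGetD t i ' ')]
    if i < (t.length : Int) ∧ (pvLookup? char2vocabidx uc).isSome then
      (pvLookup? char2vocabidx uc).getD 0          -- char2vocabidx[uppercase_char]; KeyError excluded by the guard
    else
      (pvLookup? char2vocabidx "|").getD 0)        -- char2vocabidx["|"]; KeyError outside Pre_

-- ===== PORT B =====
def getvocabidxs_alt (max_chars : Int) (text : Option String) (char2vocabidx : List (String × Int)) : List Int :=
  let s := (text.getD "").toList
  let n : Int := max max_chars 0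
  let mapped := (PySem.List.slice s none (some n)).map (fun c =>
    match pvLookup? char2vocabidx (String.ofList [PySem.Chars.upperChar c]) with
    | some v => v
    | none => (pvLookup? char2vocabidx "|").getD 0)  -- KeyError outside Pre_
  let k : Int := n - (mapped.length : Int)
  if 0 < k then mapped ++ List.replicate k.toNat ((pvLookup? char2vocabidx "|").getD 0) else mapped

-- ===== PRECONDITION & SPEC =====
-- Pre_ excludes exactly the inputs where Python A raises KeyError: a missing "|" key while
-- some position (an unmapped character of the first max_chars characters, or a padding
-- position past the end of text) actually needs the "|" fallback.  B raises there too.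
def Pre_getvocabidxs (max_chars : Int) (text : Option String) (char2vocabidx : List (String × Int)) : Prop :=
  max_chars ≤ 0 ∨ "|" ∈ char2vocabidx.map Prod.fst ∨
    (max_chars ≤ ((text.getD "").toList.length : Int) ∧
      ∀ c ∈ (text.getD "").toList.take max_chars.toNat,
        String.ofList [PySem.Chars.upperChar c] ∈ char2vocabidx.map Prod.fst)
instance (max_chars : Int) (text : Option String) (char2vocabidx : List (String × Int)) : Decidable (Pre_getvocabidxs max_chars text char2vocabidx) := by unfold Pre_getvocabidxs; infer_instance
def pvWitness_getvocabidxs : Int × Option String × (List (String × Int)) := (4, some "ab", [("A", 1), ("B", 2), ("|", 0)])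
def Spec_getvocabidxs (max_chars : Int) (text : Option String) (char2vocabidx : List (String × Int)) (out : List Int) : Prop := out = getvocabidxs_alt max_chars text char2vocabidx
instance (max_chars : Int) (text : Option String) (char2vocabidx : List (String × Int)) (out : List Int) : Decidable (Spec_getvocabidxs max_chars text char2vocabidx out) := by unfold Spec_getvocabidxs; infer_instance

-- ===== CLAIM (what is proved, stated in full; the proofs are below) =====
def Claim_equal_getvocabidxs : Prop := ∀ (max_chars : Int) (text : Option String) (char2vocabidx : List (String × Int)), Dom_getvocabidxs max_chars text char2vocabidx → Pre_getvocabidxs max_chars text char2vocabidx → Spec_getvocabidxs max_chars text char2vocabidx (getvocabidxs max_chars text char2vocabidx)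

-- ===== LEMMAS AND PROOFS =====

-- Core shape lemma: an indexed pass g over range n, which reads t inside the bound and
-- yields pad beyond it, is the mapped prefix followed by a padding block.
theorem pv_range_map_eq_take_pad (t : List Char) (f : Char → Int) (pad : Int)
    (g : Nat → Int) (hg1 : ∀ k (h : k < t.length), g k = f t[k])
    (hg2 : ∀ k, t.length ≤ k → g k = pad) :
    ∀ n : Nat, (List.range n).map g = (t.take n).map f ++ List.replicate (n - t.length) pad := by
  intro n
  induction n with
  | zero => simp
  | succ n ih =>
    rw [List.range_succ, List.map_append, ih]
    have hmap : List.map g [n] = [g n] := by simp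
    rw [hmap]
    by_cases h : n < t.length
    · have h1 : n + 1 - t.length = 0 := by omega
      have h2 : n - t.length = 0 := by omega
      rw [h1, h2, hg1 n h]
      simp only [List.replicate_zero, List.append_nil]
      rw [List.take_add_one, List.getElem?_eq_getElem h]
      simp
      rw [List.take_add_one, List.getElem?_map, List.getElem?_eq_getElem h]
      simp
    · have hle : t.length ≤ n := by omega
      rw [List.take_of_length_le hle, List.take_of_length_le (by omega)]
      have h3 : n + 1 - t.length = (n - t.length) + 1 := by omega
      rw [h3, List.replicate_succ', hg2 n hle, List.append_assoc]

theorem getvocabidxs_eq_alt (max_chars : Int) (text : Option String) (char2vocabidx : List (String × Int)) :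
    getvocabidxs max_chars text char2vocabidx = getvocabidxs_alt max_chars text char2vocabidx := by
  unfold getvocabidxs getvocabidxs_alt
  set t := (text.getD "").toList with ht
  set d := char2vocabidx
  set pad := (pvLookup? d "|").getD 0 with hpad
  set f : Char → Int := fun c =>
    match pvLookup? d (String.ofList [PySem.Chars.upperChar c]) with
    | some v => v
    | none => pad with hf
  have key : (PySem.List.pyRange 0 max_chars 1).map (fun i =>
      let uc : String := String.ofList [PySem.Chars.upperChar (PySem.List.pyGetD t i ' ')]
      if i < (t.length : Int) ∧ (pvLookup? d uc).isSome then
        (pvLookup? d uc).getD 0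
      else pad)
      = (t.take max_chars.toNat).map f ++ List.replicate (max_chars.toNat - t.length) pad := by
    rw [PySem.List.pyRange_one, List.map_map]
    have : max_chars.toNat = (max_chars - 0).toNat := by omega
    rw [← this]
    apply pv_range_map_eq_take_pad
    · intro k hk
      simp only [Function.comp]
      have hcast : ((0 : Int) + (k : Int)) = (k : Int) := by ring
      rw [hcast, PySem.List.pyGetD_natCast]
      have hget : t.getD k ' ' = t[k] := List.getD_eq_getElem t ' ' hk
      rw [hget]
      by_cases hs : (pvLookup? d (String.ofList [PySem.Chars.upperChar t[k]])).isSome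
      · rw [if_pos ⟨by exact_mod_cast hk, hs⟩]
        rw [hf]
        simp only []
        cases hm : pvLookup? d (String.ofList [PySem.Chars.upperChar t[k]]) with
        | none => rw [hm] at hs; simp at hs
        | some v => rfl
      · rw [if_neg (by intro hc; exact hs hc.2)]
        rw [hf]
        simp only []
        cases hm : pvLookup? d (String.ofList [PySem.Chars.upperChar t[k]]) with
        | none => rfl
        | some v => rw [hm] at hs; simp at hs
    · intro k hklen
      simp only [Function.comp]
      rw [if_neg]
      intro hc
      have := hc.1
      omega
  simp only []
  rw [key]
  -- now reduce the B side
  have hslice : PySem.List.slice t none (some (max max_chars 0)) = t.take max_chars.toNat := by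
    rw [PySem.List.slice_to t (show (0:Int) ≤ max max_chars 0 by omega)]
    congr 1
    omega
  rw [hslice]
  have hlen : ((t.take max_chars.toNat).map f).length = min max_chars.toNat t.length := by
    simp
  by_cases hk : 0 < max max_chars 0 - (((t.take max_chars.toNat).map f).length : Int)
  · rw [if_pos hk]
    congr 1
    congr 1
    rw [hlen] at hk ⊢
    omega
  · rw [if_neg hk]
    rw [hlen] at hk
    have : max_chars.toNat - t.length = 0 := by omega
    rw [this]
    simp

-- ===== VERDICT (by name: the statement is the Claim_ definition above) =====
theorem getvocabidxs_spec : Claim_equal_getvocabidxs := by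
  intro max_chars text char2vocabidx _ _
  unfold Spec_getvocabidxs
  exact getvocabidxs_eq_alt max_chars text char2vocabidx
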